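-- pv_equiv track=rewrite | github.com/Kim-Ju-Hyeon/Algorithm_Study | coders/bj_2212.py | solution
-- ===== SOURCE A (Python) =====
-- def solution(N, K, sensor_list):
--     if N <= K:
--         return 0
--
--     sensor_list = list(set(sensor_list))
--     sensor_list.sort()
--
--     term_list = []
--     for i in range(1, len(sensor_list)):
--         term = sensor_list[i] - sensor_list[i-1]
--         term_list.append(term)
--
--     term_list.sort(reverse=True)
--     term_list = term_list[K-1:]
--
--     return sum(term_list)
-- ===== SOURCE B (Python) =====
-- def _top_sum(k, xs):
--     # sum of the k largest elements of xs (all of them if k >= len(xs), 0 if k <= 0),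
--     # by quickselect-style partitioning instead of sorting
--     if k <= 0 or not xs:
--         return 0
--     if k >= len(xs):
--         return sum(xs)
--     p = xs[0]
--     hi = [x for x in xs[1:] if x > p]
--     lo = [x for x in xs[1:] if x <= p]
--     if k <= len(hi):
--         return _top_sum(k, hi)
--     return sum(hi) + p + _top_sum(k - len(hi) - 1, lo)
--
--
-- def solution(N, K, sensor_list):
--     if N <= K:
--         return 0
--     pts = sorted(set(sensor_list))
--     if len(pts) < 2:
--         return 0
--     gaps = [b - a for a, b in zip(pts, pts[1:])]
--     return (pts[-1] - pts[0]) - _top_sum(K - 1, gaps)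
-- ===== Notes on version B (the rewrite author's own statement) =====
-- stated objective: alternative
-- what changed: B computes the answer as total span (last minus first distinct sensor) minus the sum of the K-1 largest gaps selected by a quickselect-style partition recursion, instead of A's building the gap list, reverse-sorting it, slicing off K-1 and summing the rest.
-- intended difference: For K <= 0 with K < N and at least 3-K distinct sensors, A's negative slice term_list[K-1:] accidentally keeps only the 1-K smallest gaps (e.g. just the single smallest gap for K=0), whereas B removes no gaps and returns the full span covering all sensors, the intended cost when fewer than one group split is requested. — e.g. on solution(3, 0, [0, 1, 5]): A returns 1, B returns 5
import Mathlib
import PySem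

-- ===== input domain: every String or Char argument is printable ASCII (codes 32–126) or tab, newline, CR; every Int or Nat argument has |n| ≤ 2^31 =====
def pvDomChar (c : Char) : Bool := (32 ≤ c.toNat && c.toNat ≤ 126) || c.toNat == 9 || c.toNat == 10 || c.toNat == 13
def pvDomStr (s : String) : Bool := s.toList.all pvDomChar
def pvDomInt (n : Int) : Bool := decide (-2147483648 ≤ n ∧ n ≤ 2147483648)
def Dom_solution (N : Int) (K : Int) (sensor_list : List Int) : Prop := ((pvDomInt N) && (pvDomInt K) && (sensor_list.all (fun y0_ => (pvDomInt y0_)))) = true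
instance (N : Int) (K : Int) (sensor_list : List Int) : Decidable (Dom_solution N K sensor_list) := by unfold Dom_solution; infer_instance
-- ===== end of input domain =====

-- B replaces A's reverse-sort-and-slice of the gap list by span-minus(quickselect sum of the K-1 largest gaps); alternative decomposition, same overall cost.

-- ===== PORT A =====
def solution (N : Int) (K : Int) (sensor_list : List Int) : Int :=
  if N ≤ K then 0
  else
    let pts := PySem.List.sorted (PySem.Set.ofList sensor_list) (fun x => x) false
    let term_list := (PySem.List.pyRange 1 (pts.length : Int) 1).foldl
      (fun acc i => acc ++ [PySem.List.pyGetD pts i 0 - PySem.List.pyGetD pts (i - 1) 0]) []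
    let term_sorted := PySem.List.sorted term_list (fun x => x) true
    (PySem.List.slice term_sorted (some (K - 1)) none).sum

-- ===== PORT B =====
-- sum of the k largest elements of xs (all of them if k ≥ len, 0 if k ≤ 0), quickselect-style
def topSum (k : Int) (xs : List Int) : Int :=
  if k ≤ 0 then 0
  else
    match xs with
    | [] => 0
    | p :: t =>
      if ((t.length : Int) + 1) ≤ k then (p :: t).sum
      else
        let hi := t.filter (fun x => p < x)
        let lo := t.filter (fun x => x ≤ p)
        if k ≤ (hi.length : Int) then topSum k hi
        else hi.sum + p + topSum (k - hi.length - 1) lo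
termination_by xs.length
decreasing_by
  all_goals
    simp only [List.length_unattach]
    exact Nat.lt_succ_of_le (le_trans (List.length_filter_le _ _) (le_of_eq List.length_attach))

def solution_alt (N : Int) (K : Int) (sensor_list : List Int) : Int :=
  if N ≤ K then 0
  else
    let pts := PySem.List.sorted (PySem.Set.ofList sensor_list) (fun x => x) false
    if pts.length < 2 then 0
    else
      let gaps := (pts.zip pts.tail).map (fun ab => ab.2 - ab.1)
      (PySem.List.pyGetD pts (-1) 0 - PySem.List.pyGetD pts 0 0) - topSum (K - 1) gaps

-- ===== PRECONDITION & SPEC =====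
-- For K ≤ 0 with K < N and at least 3-K distinct sensors, A's negative slice term_list[K-1:]
-- accidentally keeps only the 1-K smallest gaps, whereas B removes no gaps and returns the full
-- span covering all sensors — the intended cost when fewer than one group split is requested.
def D_solution (N : Int) (K : Int) (sensor_list : List Int) : Prop :=
  K ≤ 0 ∧ K < N ∧ (3 - K) ≤ ((PySem.Set.ofList sensor_list).length : Int)
instance (N : Int) (K : Int) (sensor_list : List Int) : Decidable (D_solution N K sensor_list) := by
  unfold D_solution; infer_instance

def Spec_solution (N : Int) (K : Int) (sensor_list : List Int) (out : Int) : Prop :=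
  ¬ D_solution N K sensor_list → out = solution_alt N K sensor_list
instance (N : Int) (K : Int) (sensor_list : List Int) (out : Int) : Decidable (Spec_solution N K sensor_list out) := by
  unfold Spec_solution; infer_instance

def pvDiffWitness_solution : Int × Int × List Int := (3, 0, [0, 1, 5])
def pvDiffWitnessOut_solution : Int × Int := (1, 5)

-- ===== CLAIM (what is proved, stated in full; the proofs are below) =====
def Claim_unchanged_solution : Prop := ∀ (N : Int) (K : Int) (sensor_list : List Int), Dom_solution N K sensor_list → Spec_solution N K sensor_list (solution N K sensor_list)
def Claim_changed_solution : Prop := Dom_solution (pvDiffWitness_solution.1) (pvDiffWitness_solution.2.1) (pvDiffWitness_solution.2.2) ∧ D_solution (pvDiffWitness_solution.1) (pvDiffWitness_solution.2.1) (pvDiffWitness_solution.2.2) ∧ solution (pvDiffWitness_solution.1) (pvDiffWitness_solution.2.1) (pvDiffWitness_solution.2.2) = pvDiffWitnessOut_solution.1 ∧ solution_alt (pvDiffWitness_solution.1) (pvDiffWitness_solution.2.1) (pvDiffWitness_solution.2.2) = pvDiffWitnessOut_solution.2 ∧ pvDiffWitnessOut_solution.1 ≠ pvDiffWitnessOut_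solution.2
def Claim_exact_solution : Prop := ∀ (N : Int) (K : Int) (sensor_list : List Int), Dom_solution N K sensor_list → D_solution N K sensor_list → solution N K sensor_list ≠ solution_alt N K sensor_list

-- ===== LEMMAS AND PROOFS =====

-- the consecutive-gap list of l (what both programs build over the sorted distinct sensors)
def gapsOf (l : List Int) : List Int := (l.zip l.tail).map (fun ab => ab.2 - ab.1)

theorem gapsOf_length (l : List Int) : (gapsOf l).length = l.length - 1 := by
  simp [gapsOf]

theorem gapsOf_getElem (l : List Int) (k : Nat) (hk : k < (gapsOf l).length) :
    (gapsOf l)[k] = l[k + 1]'(by have := gapsOf_length l; omega) - l[k]'(by have := gapsOf_length l; omega) := by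
  simp [gapsOf, List.getElem_zip, List.getElem_tail]

theorem gapsOf_sum : ∀ (t : List Int) (a : Int),
    (gapsOf (a :: t)).sum = (a :: t).getLast (List.cons_ne_nil a t) - a := by
  intro t
  induction t with
  | nil => intro a; simp [gapsOf]
  | cons b t' ih =>
    intro a
    have h : gapsOf (a :: b :: t') = (b - a) :: gapsOf (b :: t') := rfl
    rw [h, List.sum_cons, ih b, List.getLast_cons (List.cons_ne_nil b t')]
    ring

-- the span of a nonempty list equals the sum of its consecutive gaps
theorem span_eq_gaps_sum (l : List Int) (h : l ≠ []) :
    PySem.List.pyGetD l (-1) 0 - PySem.List.pyGetD l 0 0 = (gapsOf l).sum := by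
  cases l with
  | nil => exact absurd rfl h
  | cons a t =>
    rw [PySem.List.pyGetD_neg_one _ _ (List.cons_ne_nil a t), PySem.List.pyGetD_zero_cons,
      gapsOf_sum t a]

-- A's term_list loop builds exactly gapsOf pts
theorem termList_eq_gapsOf (l : List Int) :
    (PySem.List.pyRange 1 (l.length : Int) 1).foldl
      (fun acc i => acc ++ [PySem.List.pyGetD l i 0 - PySem.List.pyGetD l (i - 1) 0]) []
    = gapsOf l := by
  rw [PySem.List.foldl_append_singleton_eq_map, PySem.List.pyRange_one]
  simp only [List.nil_append, List.map_map]
  apply List.ext_getElem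
  · simp only [List.length_map, List.length_range, gapsOf_length]
    omega
  · intro k h1 h2
    simp only [List.getElem_map, List.getElem_range, Function.comp_apply]
    rw [gapsOf_getElem]
    have hk : k < l.length - 1 := by
      simp only [List.length_map, List.length_range] at h1; omega
    have e1 : PySem.List.pyGetD l (1 + (k : Int)) 0 = l[k + 1]'(by omega) := by
      rw [PySem.List.pyGetD_eq_getElem l (i := 1 + (k : Int)) 0 (by omega) (by omega)]
      congr 1; omega
    have e2 : PySem.List.pyGetD l (1 + (k : Int) - 1) 0 = l[k]'(by omega) := by
      rw [PySem.List.pyGetD_eq_getElem l (i := 1 + (k : Int) - 1) 0 (by omega) (by omega)]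
      congr 1; omega
    rw [e1, e2]

-- descending sort splits across the pivot partition
theorem descSort_split (p : Int) (t : List Int) :
    PySem.List.sorted (p :: t) (fun x => x) true
      = PySem.List.sorted (t.filter (fun x => p < x)) (fun x => x) true
        ++ p :: PySem.List.sorted (t.filter (fun x => x ≤ p)) (fun x => x) true := by
  have hfl : List.Perm (t.filter (fun x => p < x) ++ t.filter (fun x => x ≤ p)) t := by
    have h0 := List.filter_append_perm (fun x => decide (p < x)) t
    have he : t.filter (fun x => !decide (p < x)) = t.filter (fun x => x ≤ p) := by
      apply List.filter_congr
      intro x _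
      by_cases h : p < x
      · simp [h, not_le.mpr h]
      · simp [h, not_lt.mp h]
    rwa [he] at h0
  have hperm : List.Perm (PySem.List.sorted (p :: t) (fun x => x) true)
      (PySem.List.sorted (t.filter (fun x => p < x)) (fun x => x) true
        ++ p :: PySem.List.sorted (t.filter (fun x => x ≤ p)) (fun x => x) true) := by
    refine (PySem.List.sorted_perm (p :: t) (fun x : Int => x) true).trans
      (((hfl.symm).cons p).trans ?_)
    refine (((List.Perm.append
      (PySem.List.sorted_perm (t.filter (fun x => p < x)) (fun x : Int => x) true).symm
      (PySem.List.sorted_perm (t.filter (fun x => x ≤ p)) (fun x : Int => x) true).symm).cons p)).trans ?_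
    exact List.perm_middle.symm
  refine List.Perm.eq_of_pairwise (le := fun a b => b ≤ a)
    (fun a b _ _ h1 h2 => le_antisymm h2 h1) ?_ ?_ hperm
  · exact PySem.List.sorted_pairwise_rev _ _
  · rw [List.pairwise_append]
    refine ⟨PySem.List.sorted_pairwise_rev _ _, ?_, ?_⟩
    · rw [List.pairwise_cons]
      refine ⟨?_, PySem.List.sorted_pairwise_rev _ _⟩
      intro y hy
      have hym : y ∈ t.filter (fun x => x ≤ p) := (PySem.List.mem_sorted _ _ _ _).mp hy
      simpa using List.of_mem_filter hym
    · intro x hx y hy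
      have hxm : x ∈ t.filter (fun x => p < x) := (PySem.List.mem_sorted _ _ _ _).mp hx
      have hxp : p < x := by simpa using List.of_mem_filter hxm
      rcases List.mem_cons.mp hy with rfl | hy'
      · exact le_of_lt hxp
      · have hym : y ∈ t.filter (fun x => x ≤ p) := (PySem.List.mem_sorted _ _ _ _).mp hy'
        have : y ≤ p := by simpa using List.of_mem_filter hym
        exact le_trans this (le_of_lt hxp)

-- topSum computes the sum of the k largest elements: sum of take k of the descending sort
theorem topSum_spec_aux : ∀ (n : Nat) (xs : List Int), xs.length ≤ n → ∀ (k : Int),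
    topSum k xs = ((PySem.List.sorted xs (fun x => x) true).take k.toNat).sum := by
  intro n
  induction n with
  | zero =>
    intro xs hxs k
    have hx : xs = [] := List.length_eq_zero_iff.mp (Nat.le_zero.mp hxs)
    subst hx
    rw [topSum.eq_def]
    simp [PySem.List.sorted]
  | succ m ih =>
    intro xs hxs k
    rw [topSum.eq_def]
    by_cases hk : k ≤ 0
    · simp [hk, Int.toNat_of_nonpos hk]
    · simp only [if_neg hk]
      match xs, hxs with
      | [], _ => simp [PySem.List.sorted]
      | p :: t, hxs =>
        have hlen : (PySem.List.sorted (p :: t) (fun x => x) true).length = t.length + 1 := by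
          simpa using PySem.List.length_sorted (p :: t) (fun x => x) true
        by_cases hbig : ((t.length : Int) + 1) ≤ k
        · simp only [if_pos hbig]
          rw [List.take_of_length_le (by omega),
            (PySem.List.sorted_perm (p :: t) (fun x => x) true).sum_eq]
        · simp only [if_neg hbig]
          have hhil : (t.filter (fun x => p < x)).length ≤ t.length := List.length_filter_le _ _
          have hlol : (t.filter (fun x => x ≤ p)).length ≤ t.length := List.length_filter_le _ _
          have hsl : (PySem.List.sorted (t.filter (fun x => p < x)) (fun x => x) true).length
              = (t.filter (fun x => p < x)).length := by
            simpa using PySem.List.length_sorted (t.filter (fun x => p < x)) (fun x => x) true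
          have hxs' : t.length ≤ m := by simpa using Nat.lt_succ_iff.mp (Nat.lt_of_lt_of_le (by simp) hxs)
          by_cases hcase : k ≤ ((t.filter (fun x => p < x)).length : Int)
          · simp only [if_pos hcase]
            rw [ih _ (le_trans hhil hxs') k, descSort_split p t, List.take_append,
              show k.toNat - (PySem.List.sorted (t.filter (fun x => p < x)) (fun x => x) true).length = 0
                from by omega]
            simp
          · simp only [if_neg hcase]
            rw [ih _ (le_trans hlol hxs') (k - (t.filter (fun x => p < x)).length - 1),
              descSort_split p t, List.take_append]
            rw [List.take_of_length_le
              (l := PySem.List.sorted (t.filter (fun x => p < x)) (fun x => x) true)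
              (i := k.toNat) (by omega)]
            have h1 : k.toNat - (PySem.List.sorted (t.filter (fun x => p < x)) (fun x => x) true).length
                = (k - (t.filter (fun x => p < x)).length - 1).toNat + 1 := by omega
            rw [h1, List.take_succ_cons, List.sum_append, List.sum_cons,
              (PySem.List.sorted_perm (t.filter (fun x => p < x)) (fun x => x) true).sum_eq]
            ring

theorem topSum_spec (xs : List Int) (k : Int) :
    topSum k xs = ((PySem.List.sorted xs (fun x => x) true).take k.toNat).sum :=
  topSum_spec_aux xs.length xs le_rfl k

-- every gap of the sorted distinct sensor list is positive
theorem gapsOf_pos (xs : List Int) (g : Int)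
    (hg : g ∈ gapsOf (PySem.List.sorted (PySem.Set.ofList xs) (fun x => x) false)) : 0 < g := by
  have hpw := PySem.List.sorted_ofList_pairwise_lt xs
  rcases List.mem_iff_getElem.mp hg with ⟨k, hk, he⟩
  rw [gapsOf_getElem _ _ hk] at he
  have hlt := List.pairwise_iff_getElem.mp hpw k (k + 1)
    (by have := gapsOf_length (PySem.List.sorted (PySem.Set.ofList xs) (fun x => x) false); omega)
    (by have := gapsOf_length (PySem.List.sorted (PySem.Set.ofList xs) (fun x => x) false); omega)
    (by omega)
  omega

-- closed forms of the two programs when N > K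
theorem solution_closed (N K : Int) (l : List Int) (hNK : ¬ N ≤ K) :
    solution N K l =
      (PySem.List.slice
        (PySem.List.sorted (gapsOf (PySem.List.sorted (PySem.Set.ofList l) (fun x => x) false)) (fun x => x) true)
        (some (K - 1)) none).sum := by
  simp only [solution, if_neg hNK]
  rw [termList_eq_gapsOf]

theorem solution_alt_closed (N K : Int) (l : List Int) (hNK : ¬ N ≤ K)
    (h2 : ¬ (PySem.List.sorted (PySem.Set.ofList l) (fun x => x) false).length < 2) :
    solution_alt N K l =
      (gapsOf (PySem.List.sorted (PySem.Set.ofList l) (fun x => x) false)).sum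
        - topSum (K - 1) (gapsOf (PySem.List.sorted (PySem.Set.ofList l) (fun x => x) false)) := by
  simp only [solution_alt, if_neg hNK, if_neg h2]
  rw [span_eq_gaps_sum _ (by intro h; rw [h] at h2; simp at h2)]
  rfl

-- ===== VERDICT (by name: the statement is the Claim_ definition above) =====
theorem solution_spec : Claim_unchanged_solution := by
  intro N K l _
  unfold Spec_solution
  intro hnd
  by_cases hNK : N ≤ K
  · simp [solution, solution_alt, if_pos hNK]
  · set pts := PySem.List.sorted (PySem.Set.ofList l) (fun x => x) false with hpts
    set g := gapsOf pts with hg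
    set d := PySem.List.sorted g (fun x => x) true with hd
    have hdg : d.length = g.length := by simpa [hd] using PySem.List.length_sorted g (fun x => x) true
    have hnlen : pts.length = (PySem.Set.ofList l).length := by
      simpa [hpts] using PySem.List.length_sorted (PySem.Set.ofList l) (fun x => x) false
    by_cases h2 : pts.length < 2
    · -- fewer than two distinct sensors: A sums an empty slice, B returns 0
      have hgnil : g = [] := by
        have := gapsOf_length pts
        rw [← hg] at this
        exact List.length_eq_zero_iff.mp (by omega)
      rw [solution_closed N K l hNK]
      simp only [solution_alt, if_neg hNK, ← hpts, if_pos h2]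
      rw [← hg, hgnil]
      simp [PySem.List.sorted, PySem.List.slice]
    · rw [solution_closed N K l hNK, solution_alt_closed N K l hNK (by exact h2),
        ← hpts, ← hg, topSum_spec, ← hd]
      have hsum : d.sum = g.sum := (PySem.List.sorted_perm g (fun x => x) true).sum_eq
      by_cases hK : 1 ≤ K
      · -- K ≥ 1 : A sums the slice from K-1, B subtracts the K-1 largest
        rw [PySem.List.slice_from d (a := K - 1) (by omega)]
        have := List.sum_take_add_sum_drop d (K - 1).toNat
        omega
      · -- K ≤ 0 outside D_: few distinct sensors, the negative slice keeps the whole list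
        have hfew : (PySem.Set.ofList l).length ≤ (2 - K).toNat := by
          unfold D_solution at hnd
          push_neg at hnd
          have := hnd (by omega) (by omega)
          omega
        have hglen : g.length ≤ (1 - K).toNat := by
          have := gapsOf_length pts
          rw [← hg] at this
          omega
        rw [PySem.List.slice_some_none]
        have hclamp : PySem.List.clampIdx d.length (K - 1) = 0 := by
          simp only [PySem.List.clampIdx]
          split_ifs <;> omega
        rw [hclamp]
        have hts : topSum (K - 1) g = 0 := by
          rw [topSum.eq_def]
          simp [show K - 1 ≤ 0 by omega]
        rw [← topSum_spec, hts]
        simpa using hsum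

theorem solution_changed : Claim_changed_solution := by
  unfold Claim_changed_solution
  refine ⟨by decide, by decide, by decide, ?_, by decide⟩
  have h := solution_alt_closed 3 0 [0, 1, 5] (by decide) (by decide)
  rw [show pvDiffWitness_solution = ((3 : Int), (0 : Int), ([0, 1, 5] : List Int)) from rfl]
  simp only []
  rw [h, topSum.eq_def]
  simp only [show (0:Int) - 1 ≤ 0 from by decide, if_pos]
  decide

theorem solution_tight : Claim_exact_solution := by
  intro N K l _ hD
  obtain ⟨hK0, hKN, hdist⟩ := hD
  have hNK : ¬ N ≤ K := by omega
  set pts := PySem.List.sorted (PySem.Set.ofList l) (fun x => x) false with hpts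
  set g := gapsOf pts with hg
  set d := PySem.List.sorted g (fun x => x) true with hd
  have hnlen : pts.length = (PySem.Set.ofList l).length := by
    simpa [hpts] using PySem.List.length_sorted (PySem.Set.ofList l) (fun x => x) false
  have hglen : g.length = pts.length - 1 := by rw [hg]; exact gapsOf_length pts
  have hdg : d.length = g.length := by simpa [hd] using PySem.List.length_sorted g (fun x => x) true
  have h2 : ¬ pts.length < 2 := by omega
  rw [solution_closed N K l hNK, solution_alt_closed N K l hNK (by exact h2),
    ← hpts, ← hg, ← hd]
  have hts : topSum (K - 1) g = 0 := by
    rw [topSum.eq_def]; simp [show K - 1 ≤ 0 by omega]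
  rw [hts]
  have hsum : d.sum = g.sum := (PySem.List.sorted_perm g (fun x => x) true).sum_eq
  rw [PySem.List.slice_some_none]
  have hclamp : PySem.List.clampIdx d.length (K - 1) = d.length - (1 - K).toNat := by
    simp only [PySem.List.clampIdx]
    split_ifs <;> omega
  rw [hclamp]
  -- the dropped prefix is nonempty and consists of positive gaps
  have htake := List.sum_take_add_sum_drop d (d.length - (1 - K).toNat)
  have hpos : 0 < (d.take (d.length - (1 - K).toNat)).sum := by
    apply List.sum_pos
    · intro x hx
      have hxd : x ∈ d := List.mem_of_mem_take hx
      have hxg : x ∈ g := (PySem.List.mem_sorted _ _ _ _).mp hxd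
      exact gapsOf_pos l x (by rw [hg, hpts] at hxg; exact hxg)
    · have : 0 < d.length - (1 - K).toNat := by omega
      intro hnil
      rw [List.take_eq_nil_iff] at hnil
      rcases hnil with h | h
      · omega
      · rw [h] at this; simp at this
  intro habs
  rw [sub_zero] at habs
  omega
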